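-- pv_equiv track=rewrite | github.com/KATEHOK/Informatics | undefined/polyakov_v_20/12.py | sevenTeenth
-- ===== SOURCE A (Python) =====
-- def sevenTeenth(minRange, maxRange):
--     counter = 0
--     mySum = 0
--     for num in range(minRange, maxRange + 1):
--         if num % 2 == 0 and num % 13 > 0:
--             counter += 1
--             mySum += num
--     return f'count: {counter}, sum: {mySum}'
-- ===== SOURCE B (Python) =====
-- def sevenTeenth(minRange, maxRange):
--     if maxRange < minRange:
--         return 'count: 0, sum: 0'
--     def tri(n):
--         return n * (n + 1) // 2
--     def cnt(d):
--         return maxRange // d - (minRange - 1) // d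
--     def tot(d):
--         return d * (tri(maxRange // d) - tri((minRange - 1) // d))
--     counter = cnt(2) - cnt(26)
--     mySum = tot(2) - tot(26)
--     return f'count: {counter}, sum: {mySum}'
-- ===== Notes on version B (the rewrite author's own statement) =====
-- stated objective: faster
-- what changed: Replaced the O(n) loop over range(minRange, maxRange+1) with closed-form arithmetic: count and sum of evens minus count and sum of multiples of 26, via floor divisions and a triangular-number formula.
import Mathlib
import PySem

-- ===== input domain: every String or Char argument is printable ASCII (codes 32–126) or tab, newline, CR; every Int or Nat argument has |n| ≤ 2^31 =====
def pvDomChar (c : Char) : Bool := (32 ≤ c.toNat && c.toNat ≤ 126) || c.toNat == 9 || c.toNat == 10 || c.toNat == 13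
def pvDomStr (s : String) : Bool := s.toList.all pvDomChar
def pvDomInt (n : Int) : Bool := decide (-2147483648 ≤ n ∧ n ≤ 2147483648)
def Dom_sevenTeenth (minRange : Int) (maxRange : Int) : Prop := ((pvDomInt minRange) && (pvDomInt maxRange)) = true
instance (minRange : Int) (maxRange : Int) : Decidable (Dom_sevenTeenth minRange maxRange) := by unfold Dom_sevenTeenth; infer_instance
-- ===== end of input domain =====

-- B replaces A's linear scan by closed-form arithmetic-series formulas (O(1)); return value proved equal on all inputs.

-- ===== PORT A =====
def sevenTeenth (minRange : Int) (maxRange : Int) : String :=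
  let st := (PySem.List.pyRange minRange (maxRange + 1) 1).foldl
    (fun (st : Int × Int) num =>
      if PySem.Int.mod num 2 = 0 ∧ PySem.Int.mod num 13 > 0 then (st.1 + 1, st.2 + num) else st)
    (0, 0)
  "count: " ++ PySem.Int.toStr st.1 ++ ", sum: " ++ PySem.Int.toStr st.2

-- ===== PORT B =====
-- tri n = n * (n + 1) // 2
def pvTri (n : Int) : Int := PySem.Int.floordiv (n * (n + 1)) 2
-- cnt d = maxRange // d - (minRange - 1) // d
def pvCnt (minRange maxRange d : Int) : Int :=
  PySem.Int.floordiv maxRange d - PySem.Int.floordiv (minRange - 1) d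
-- tot d = d * (tri(maxRange // d) - tri((minRange - 1) // d))
def pvTot (minRange maxRange d : Int) : Int :=
  d * (pvTri (PySem.Int.floordiv maxRange d) - pvTri (PySem.Int.floordiv (minRange - 1) d))

def sevenTeenth_alt (minRange : Int) (maxRange : Int) : String :=
  if maxRange < minRange then "count: 0, sum: 0"
  else
    let counter := pvCnt minRange maxRange 2 - pvCnt minRange maxRange 26
    let mySum := pvTot minRange maxRange 2 - pvTot minRange maxRange 26
    "count: " ++ PySem.Int.toStr counter ++ ", sum: " ++ PySem.Int.toStr mySum

-- ===== PRECONDITION & SPEC =====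
def Spec_sevenTeenth (minRange : Int) (maxRange : Int) (out : String) : Prop := out = sevenTeenth_alt minRange maxRange
instance (minRange : Int) (maxRange : Int) (out : String) : Decidable (Spec_sevenTeenth minRange maxRange out) := by unfold Spec_sevenTeenth; infer_instance

-- ===== CLAIM (what is proved, stated in full; the proofs are below) =====
def Claim_equal_sevenTeenth : Prop := ∀ (minRange : Int) (maxRange : Int), Dom_sevenTeenth minRange maxRange → Spec_sevenTeenth minRange maxRange (sevenTeenth minRange maxRange)

-- ===== LEMMAS AND PROOFS =====

theorem pvFd2 (a : Int) : PySem.Int.floordiv a 2 = a / 2 :=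
  PySem.Int.floordiv_eq_ediv_of_pos (by norm_num)

theorem pvFd26 (a : Int) : PySem.Int.floordiv a 26 = a / 26 :=
  PySem.Int.floordiv_eq_ediv_of_pos (by norm_num)

theorem pvMod2 (a : Int) : PySem.Int.mod a 2 = a % 2 :=
  PySem.Int.mod_eq_emod_of_pos (by norm_num)

theorem pvMod13 (a : Int) : PySem.Int.mod a 13 = a % 13 :=
  PySem.Int.mod_eq_emod_of_pos (by norm_num)

theorem pvTri_succ (q : Int) : pvTri (q + 1) = pvTri q + (q + 1) := by
  obtain ⟨k, hk⟩ := Int.even_mul_succ_self q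
  have h1 : q * (q + 1) = 2 * k := by omega
  have h2 : (q + 1) * (q + 1 + 1) = 2 * (k + (q + 1)) := by nlinarith [h1]
  simp only [pvTri, pvFd2, h1, h2, Int.mul_ediv_cancel_left _ (by norm_num : (2:Int) ≠ 0)]

-- d * (tri(b/d) - tri((b-1)/d)) = b when d ∣ b, else 0 (hypotheses dischargeable by omega for literal d)
theorem pvTot_step (d b : Int)
    (h1 : d ∣ b → b / d = (b - 1) / d + 1 ∧ d * (b / d) = b)
    (h2 : ¬ d ∣ b → b / d = (b - 1) / d) :
    d * (pvTri (b / d) - pvTri ((b - 1) / d)) = if d ∣ b then b else 0 := by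
  by_cases h : d ∣ b
  · obtain ⟨hq, hm⟩ := h1 h
    rw [if_pos h, hq, pvTri_succ]
    have : pvTri ((b - 1) / d) + ((b - 1) / d + 1) - pvTri ((b - 1) / d) = (b - 1) / d + 1 := by ring
    rw [this, ← hq]
    exact hm
  · rw [if_neg h, h2 h]
    ring

theorem pvLoop (n : Nat) : ∀ (a b : Int), a - 1 ≤ b → (b - (a - 1)).toNat = n →
    (PySem.List.pyRange a (b + 1) 1).foldl
      (fun (st : Int × Int) num =>
        if PySem.Int.mod num 2 = 0 ∧ PySem.Int.mod num 13 > 0 then (st.1 + 1, st.2 + num) else st)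
      (0, 0)
    = (pvCnt a b 2 - pvCnt a b 26, pvTot a b 2 - pvTot a b 26) := by
  induction n with
  | zero =>
    intro a b hle h0
    have hb : b = a - 1 := by omega
    subst hb
    rw [PySem.List.pyRange_one_eq_nil (by omega)]
    simp [pvCnt, pvTot]
  | succ n ih =>
    intro a b hle hn
    have hab : a ≤ b := by omega
    rw [PySem.List.pyRange_one_succ_right hab]
    have hb1 : b = (b - 1) + 1 := by ring
    rw [List.foldl_append]
    have ihx := ih a (b - 1) (by omega) (by omega)
    rw [show PySem.List.pyRange a b 1 = PySem.List.pyRange a ((b - 1) + 1) 1 by rw [← hb1]]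
    rw [ihx]
    simp only [List.foldl_cons, List.foldl_nil, pvMod2, pvMod13]
    have t2 := pvTot_step 2 b (fun h => by omega) (fun h => by omega)
    have t26 := pvTot_step 26 b (fun h => by omega) (fun h => by omega)
    by_cases hc : b % 2 = 0 ∧ b % 13 > 0
    · rw [if_pos hc]
      have h2 : (2:Int) ∣ b := by omega
      have h26 : ¬ (26:Int) ∣ b := by omega
      refine Prod.ext ?_ ?_
      · simp only [pvCnt, pvFd2, pvFd26]
        omega
      · simp only [pvTot, pvFd2, pvFd26]
        have e2 : (2:Int) * (pvTri (b / 2) - pvTri ((b - 1) / 2)) = b := by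
          rw [t2, if_pos h2]
        have e26 : (26:Int) * (pvTri (b / 26) - pvTri ((b - 1) / 26)) = 0 := by
          rw [t26, if_neg h26]
        nlinarith [e2, e26]
    · rw [if_neg hc]
      have h2 : ¬ ((2:Int) ∣ b ∧ ¬ (26:Int) ∣ b) := by omega
      refine Prod.ext ?_ ?_
      · simp only [pvCnt, pvFd2, pvFd26]
        omega
      · simp only [pvTot, pvFd2, pvFd26]
        by_cases hd2 : (2:Int) ∣ b
        · have hd26 : (26:Int) ∣ b := by omega
          have e2 : (2:Int) * (pvTri (b / 2) - pvTri ((b - 1) / 2)) = b := by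
            rw [t2, if_pos hd2]
          have e26 : (26:Int) * (pvTri (b / 26) - pvTri ((b - 1) / 26)) = b := by
            rw [t26, if_pos hd26]
          nlinarith [e2, e26]
        · have hd26 : ¬ (26:Int) ∣ b := by omega
          have e2 : (2:Int) * (pvTri (b / 2) - pvTri ((b - 1) / 2)) = 0 := by
            rw [t2, if_neg hd2]
          have e26 : (26:Int) * (pvTri (b / 26) - pvTri ((b - 1) / 26)) = 0 := by
            rw [t26, if_neg hd26]
          nlinarith [e2, e26]

-- ===== VERDICT (by name: the statement is the Claim_ definition above) =====
theorem sevenTeenth_spec : Claim_equal_sevenTeenth := by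
  intro a b _
  unfold Spec_sevenTeenth sevenTeenth sevenTeenth_alt
  by_cases h : b < a
  · rw [if_pos h, PySem.List.pyRange_one_eq_nil (by omega)]
    rfl
  · rw [if_neg h, pvLoop (b - (a - 1)).toNat a b (by omega) rfl]
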